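-- pv_equiv track=rewrite | github.com/ByteHackr/CVE_Insight | CVE_Insight.py | get_primary_cvss_metric
-- ===== SOURCE A (Python) =====
-- def get_primary_cvss_metric(metric_list, preferred_source="nvd@nist.gov"):
--     """Selects the primary CVSS metric from a list."""
--     if not metric_list: return None
--     for item in metric_list:
--         if item.get("source") == preferred_source and item.get("type") == "Primary": return item
--     for item in metric_list:
--         if item.get("type") == "Primary": return item
--     if metric_list: return metric_list[0]
--     return None
-- ===== SOURCE B (Python) =====
-- def get_primary_cvss_metric(metric_list, preferred_source="nvd@nist.gov"):
--     """Selects the primary CVSS metric from a list."""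
--     if not metric_list:
--         return None
--
--     def priority(item):
--         if item.get("source") == preferred_source and item.get("type") == "Primary":
--             return 0
--         if item.get("type") == "Primary":
--             return 1
--         return 2
--
--     return min(metric_list, key=priority)
-- ===== Notes on version B (the rewrite author's own statement) =====
-- stated objective: simpler
-- what changed: Replaces A's two sequential scans plus head fallback by a single keyed min over a 3-level priority (preferred-source Primary < Primary < rest); min's first-minimum rule reproduces A's first-match tie-breaking.
import Mathlib
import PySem

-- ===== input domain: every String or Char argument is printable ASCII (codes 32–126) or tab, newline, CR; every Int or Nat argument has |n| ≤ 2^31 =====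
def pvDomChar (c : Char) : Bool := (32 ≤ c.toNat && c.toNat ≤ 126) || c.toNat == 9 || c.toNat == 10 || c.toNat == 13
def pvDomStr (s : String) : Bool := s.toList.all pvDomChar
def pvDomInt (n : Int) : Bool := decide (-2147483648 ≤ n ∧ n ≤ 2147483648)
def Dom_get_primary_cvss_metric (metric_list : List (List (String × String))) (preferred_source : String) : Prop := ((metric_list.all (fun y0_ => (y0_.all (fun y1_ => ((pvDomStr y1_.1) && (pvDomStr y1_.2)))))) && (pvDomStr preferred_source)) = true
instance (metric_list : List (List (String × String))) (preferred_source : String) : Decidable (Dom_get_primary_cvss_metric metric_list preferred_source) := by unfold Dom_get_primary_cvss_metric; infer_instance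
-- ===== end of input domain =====

-- B replaces A's two sequential scans plus head fallback by one keyed min over a 3-level priority (objective: simpler).
-- Shared helper: item.get(k) on the association-list dict (first match), and the two branch conditions.
def pvGet (item : List (String × String)) (key : String) : Option String :=
  (item.find? (fun p => p.1 == key)).map (fun p => p.2)

def pvIsPrefPrimary (preferred_source : String) (item : List (String × String)) : Bool :=
  (pvGet item "source" == some preferred_source) && (pvGet item "type" == some "Primary")

def pvIsPrimary (item : List (String × String)) : Bool :=
  pvGet item "type" == some "Primary"

-- ===== PORT A =====
def get_primary_cvss_metric (metric_list : List (List (String × String))) (preferred_source : String) : Option (List (String × String)) :=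
  if metric_list = [] then none
  else
    match metric_list.find? (pvIsPrefPrimary preferred_source) with
    | some item => some item
    | none =>
      match metric_list.find? pvIsPrimary with
      | some item => some item
      | none =>
        match metric_list with
        | [] => none
        | x :: _ => some x

-- ===== PORT B =====
def pvPriority (preferred_source : String) (item : List (String × String)) : Nat :=
  if pvIsPrefPrimary preferred_source item then 0
  else if pvIsPrimary item then 1
  else 2

def get_primary_cvss_metric_alt (metric_list : List (List (String × String))) (preferred_source : String) : Option (List (String × String)) :=
  if metric_list = [] then none
  else PySem.List.min? metric_list (pvPriority preferred_source)

-- ===== PRECONDITION & SPEC =====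
def Spec_get_primary_cvss_metric (metric_list : List (List (String × String))) (preferred_source : String) (out : Option (List (String × String))) : Prop := out = get_primary_cvss_metric_alt metric_list preferred_source
instance (metric_list : List (List (String × String))) (preferred_source : String) (out : Option (List (String × String))) : Decidable (Spec_get_primary_cvss_metric metric_list preferred_source out) := by unfold Spec_get_primary_cvss_metric; infer_instance

-- ===== CLAIM (what is proved, stated in full; the proofs are below) =====
def Claim_equal_get_primary_cvss_metric : Prop := ∀ (metric_list : List (List (String × String))) (preferred_source : String), Dom_get_primary_cvss_metric metric_list preferred_source → Spec_get_primary_cvss_metric metric_list preferred_source (get_primary_cvss_metric metric_list preferred_source)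

-- ===== LEMMAS AND PROOFS =====
lemma pvPref_imp_Prim {ps : String} {it : List (String × String)}
    (h : pvIsPrefPrimary ps it = true) : pvIsPrimary it = true := by
  simp [pvIsPrefPrimary, pvIsPrimary] at h ⊢
  exact h.2

lemma pv_min_cons (ps : String) (x y : List (String × String))
    (t : List (List (String × String))) :
    PySem.List.min? (x :: y :: t) (pvPriority ps)
    = PySem.List.min? ((if pvPriority ps y < pvPriority ps x then y else x) :: t) (pvPriority ps) := by
  simp only [PySem.List.min?, List.foldl_cons, apply_ite (f := fun z => some z)]

lemma pv_fold (ps : String) (xs : List (List (String × String))) :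
    ∀ (x : List (String × String)),
    PySem.List.min? (x :: xs) (pvPriority ps)
    = some (((x :: xs).find? (pvIsPrefPrimary ps)).getD
              (((x :: xs).find? pvIsPrimary).getD x)) := by
  induction xs with
  | nil =>
    intro x
    by_cases h0 : pvIsPrefPrimary ps x = true
    · simp [PySem.List.min?, List.find?, h0, pvPref_imp_Prim h0]
    · by_cases h1 : pvIsPrimary x = true <;> simp [PySem.List.min?, List.find?, h0, h1]
  | cons y t ih =>
    intro x
    rw [pv_min_cons]
    by_cases h0x : pvIsPrefPrimary ps x = true
    · have h1x := pvPref_imp_Prim h0x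
      simp [pvPriority, h0x, h1x, ih, List.find?]
    · by_cases h0y : pvIsPrefPrimary ps y = true
      · have h1y := pvPref_imp_Prim h0y
        by_cases h1x : pvIsPrimary x = true <;>
          simp [pvPriority, h0x, h0y, h1x, h1y, ih, List.find?]
      · by_cases h1x : pvIsPrimary x = true <;>
          by_cases h1y : pvIsPrimary y = true <;>
          simp [pvPriority, h0x, h0y, h1x, h1y, ih, List.find?]

-- ===== VERDICT (by name: the statement is the Claim_ definition above) =====
theorem get_primary_cvss_metric_spec : Claim_equal_get_primary_cvss_metric := by
  intro ml ps _
  unfold Spec_get_primary_cvss_metric get_primary_cvss_metric get_primary_cvss_metric_alt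
  cases ml with
  | nil => simp
  | cons x xs =>
    have hne : (x :: xs) ≠ [] := by simp
    have hmin : PySem.List.min? (x :: xs) (pvPriority ps)
        = some (((x :: xs).find? (pvIsPrefPrimary ps)).getD
                  (((x :: xs).find? pvIsPrimary).getD x)) := pv_fold ps xs x
    rw [if_neg hne, if_neg hne, hmin]
    rcases h0 : (x :: xs).find? (pvIsPrefPrimary ps) with _ | it
    · rcases h1 : (x :: xs).find? pvIsPrimary with _ | it' <;> simp
    · simp
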